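-- pv_equiv track=rewrite | github.com/ngvgi/algos | Problem attempts/string letters.py | solution
-- ===== SOURCE A (Python) =====
-- def solution(A):
--     if len(A) == 0 or len(A) == 1:
--         return 0
--
--     A_count, removables, Bs_after_As, Bs_before_As = 0, 0, 0, 0
--
--     for i in range(len(A)):
--         if i == 0:
--             if A[i] == 'B':
--                 Bs_before_As += 1
--                 continue
--             else:
--                 A_count += 1
--                 continue
--
--         if A[i] == 'B' and A_count == 0:
--             Bs_before_As += 1
--         if A[i] == 'A' and Bs_before_As > 0:
--             removables = Bs_before_As
--             Bs_before_As = 0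
--             A_count += 1
--         if A[i] == 'B' and A_count > 0:
--             Bs_after_As += 1
--         if A[i] == 'A' and Bs_after_As > 0:
--             removables += 1
--
--     return removables
-- ===== SOURCE B (Python) =====
-- def _finish(A, p, lead):
--     q = A.find('B', p + 1)
--     return lead + (A[q + 1:].count('A') if q != -1 else 0)
--
--
-- def solution(A):
--     if len(A) < 2:
--         return 0
--     if A[0] == 'B':
--         p = A.find('A')
--         if p == -1:
--             return 0
--         lead = A[:p].count('B')
--         return _finish(A, p, lead)
--     return _finish(A, 0, 0)
-- ===== Notes on version B (the rewrite author's own statement) =====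
-- stated objective: simpler
-- what changed: Replaces A's single stateful four-variable indexed loop with position finding plus slice counts: locate the pivot (first 'A' after a leading 'B', else position 0), count B's before it, then count A's after the first B past the pivot.
import Mathlib
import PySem

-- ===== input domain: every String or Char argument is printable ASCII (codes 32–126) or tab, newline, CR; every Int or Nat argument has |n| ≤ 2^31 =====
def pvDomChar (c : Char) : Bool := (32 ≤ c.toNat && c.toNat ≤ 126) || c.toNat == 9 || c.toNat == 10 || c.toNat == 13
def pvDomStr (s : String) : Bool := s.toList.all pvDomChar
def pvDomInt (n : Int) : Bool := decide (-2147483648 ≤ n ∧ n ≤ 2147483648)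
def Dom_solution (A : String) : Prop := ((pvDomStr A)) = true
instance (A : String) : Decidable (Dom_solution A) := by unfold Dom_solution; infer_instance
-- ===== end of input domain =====

-- B replaces A's single stateful four-variable indexed loop by find/slice/count position arithmetic; objective: simpler.

-- ===== PORT A =====
-- the loop body of A for indices i ≥ 1, on the state (A_count, removables, Bs_after_As, Bs_before_As)
def pvStep1 (s : Int × Int × Int × Int) (c : Char) : Int × Int × Int × Int :=
  match s with
  | (ac, rem, ba, bb) =>
    let bb := if c = 'B' ∧ ac = 0 then bb + 1 else bb
    let t := if c = 'A' ∧ 0 < bb then (bb, (0 : Int), ac + 1) else (rem, bb, ac)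
    match t with
    | (rem, bb, ac) =>
      let ba := if c = 'B' ∧ 0 < ac then ba + 1 else ba
      let rem := if c = 'A' ∧ 0 < ba then rem + 1 else rem
      (ac, rem, ba, bb)

-- the full loop body: the i == 0 iteration only classifies the first character
def pvStepA (s : Int × Int × Int × Int) (ci : Char × Nat) : Int × Int × Int × Int :=
  if ci.2 = 0 then
    match s with
    | (ac, rem, ba, bb) => if ci.1 = 'B' then (ac, rem, ba, bb + 1) else (ac + 1, rem, ba, bb)
  else pvStep1 s ci.1

def solution (A : String) : Int :=
  let cs := A.toList
  if cs.length = 0 ∨ cs.length = 1 then 0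
  else ((cs.zipIdx 0).foldl pvStepA (0, 0, 0, 0)).2.1

-- ===== PORT B =====
-- q = A.find('B', p+1); return lead + (A[q+1:].count('A') if q != -1 else 0)
def pvFinish (cs : List Char) (p : Int) (lead : Int) : Int :=
  let q := PySem.Chars.findFrom cs ['B'] (p + 1) none
  lead + (if q ≠ -1 then (PySem.Chars.count (PySem.List.slice cs (some (q + 1)) none) ['A'] : Int) else 0)

def solution_alt (A : String) : Int :=
  let cs := A.toList
  if cs.length < 2 then 0
  else if PySem.List.pyGet? cs 0 = some 'B' then
    let p := PySem.Chars.find cs ['A']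
    if p = -1 then 0
    else
      let lead : Int := PySem.Chars.count (PySem.List.slice cs none (some p)) ['B']
      pvFinish cs p lead
  else pvFinish cs 0 0

-- ===== PRECONDITION & SPEC =====
def Spec_solution (A : String) (out : Int) : Prop := out = solution_alt A
instance (A : String) (out : Int) : Decidable (Spec_solution A out) := by unfold Spec_solution; infer_instance

-- ===== CLAIM (what is proved, stated in full; the proofs are below) =====
def Claim_equal_solution : Prop := ∀ (A : String), Dom_solution A → Spec_solution A (solution A)

-- ===== LEMMAS AND PROOFS =====

-- number of A's strictly after the first B of the list (0 if no B)
def pvTail : List Char → Int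
  | [] => 0
  | c :: r => if c = 'B' then (r.count 'A' : Int) else pvTail r

-- B's 'leading phase' value: k B's already seen, no A yet
def pvLead : List Char → Int → Int
  | [], _ => 0
  | c :: r, k => if c = 'A' then k + pvTail r else pvLead r (if c = 'B' then k + 1 else k)

theorem pv_zip_shift (l : List Char) : ∀ (k : Nat) (s : Int × Int × Int × Int),
    ((l.zipIdx (k + 1)).foldl pvStepA s) = l.foldl pvStep1 s := by
  induction l with
  | nil => intro k s; rfl
  | cons c r ih =>
    intro k s
    simp only [List.zipIdx_cons, List.foldl_cons]
    rw [show k + 1 + 1 = (k + 1) + 1 from rfl, ih]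
    simp [pvStepA]

theorem pv_phaseT (l : List Char) : ∀ (ac r ba : Int), 0 < ac → 0 < ba →
    (l.foldl pvStep1 (ac, r, ba, 0)).2.1 = r + (l.count 'A' : Int) := by
  induction l with
  | nil => intro ac r ba _ _; simp
  | cons c t ih =>
    intro ac r ba hac hba
    by_cases hA : c = 'A'
    · subst hA
      have hac0 : ¬ ac = 0 := by omega
      have : pvStep1 (ac, r, ba, 0) 'A' = (ac, r + 1, ba, 0) := by
        simp [pvStep1, hba, hac0]
      rw [List.foldl_cons, this, ih _ _ _ hac hba]
      simp [List.count_cons]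
      ring
    · by_cases hB : c = 'B'
      · subst hB
        have hac0 : ¬ ac = 0 := by omega
        have : pvStep1 (ac, r, ba, 0) 'B' = (ac, r, ba + 1, 0) := by
          simp [pvStep1, hac0, hac]
        rw [List.foldl_cons, this, ih _ _ _ hac (by omega)]
        simp [List.count_cons]
      · have : pvStep1 (ac, r, ba, 0) c = (ac, r, ba, 0) := by
          simp [pvStep1, hA, hB]
        rw [List.foldl_cons, this, ih _ _ _ hac hba]
        simp [List.count_cons, hA]

theorem pv_phaseM (l : List Char) : ∀ (ac r : Int), 0 < ac →
    (l.foldl pvStep1 (ac, r, 0, 0)).2.1 = r + pvTail l := by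
  induction l with
  | nil => intro ac r _; simp [pvTail]
  | cons c t ih =>
    intro ac r hac
    by_cases hB : c = 'B'
    · subst hB
      have hac0 : ¬ ac = 0 := by omega
      have : pvStep1 (ac, r, 0, 0) 'B' = (ac, r, 1, 0) := by
        simp [pvStep1, hac0, hac]
      rw [List.foldl_cons, this, pv_phaseT t _ _ _ hac (by omega)]
      simp [pvTail]
    · have : pvStep1 (ac, r, 0, 0) c = (ac, r, 0, 0) := by
        by_cases hA : c = 'A' <;> simp [pvStep1, hA, hB]
      rw [List.foldl_cons, this, ih _ _ hac]
      simp [pvTail, hB]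

theorem pv_phaseL (l : List Char) : ∀ (k : Int), 0 < k →
    (l.foldl pvStep1 (0, 0, 0, k)).2.1 = pvLead l k := by
  induction l with
  | nil => intro k _; simp [pvLead]
  | cons c t ih =>
    intro k hk
    by_cases hA : c = 'A'
    · subst hA
      have : pvStep1 (0, 0, 0, k) 'A' = (1, k, 0, 0) := by
        simp [pvStep1, hk]
      rw [List.foldl_cons, this, pv_phaseM t _ _ (by omega)]
      simp [pvLead]
    · by_cases hB : c = 'B'
      · subst hB
        have : pvStep1 (0, 0, 0, k) 'B' = (0, 0, 0, k + 1) := by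
          simp [pvStep1]
        rw [List.foldl_cons, this, ih _ (by omega)]
        simp [pvLead]
      · have : pvStep1 (0, 0, 0, k) c = (0, 0, 0, k) := by
          simp [pvStep1, hA, hB]
        rw [List.foldl_cons, this, ih _ hk]
        simp [pvLead, hA, hB]

-- characterisation of solution (A's port) for a nonempty tail
theorem pv_solution_eq (A : String) (c : Char) (r : List Char) (hA : A.toList = c :: r)
    (hr : r ≠ []) :
    solution A = if c = 'B' then pvLead r 1 else pvTail r := by
  have hlen : ¬ ((c :: r).length = 0 ∨ (c :: r).length = 1) := by
    cases r with
    | nil => exact absurd rfl hr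
    | cons d t => simp
  simp only [solution, hA, hlen, if_false]
  have hz : (c :: r).zipIdx 0 = (c, 0) :: r.zipIdx 1 := by simp [List.zipIdx_cons]
  rw [hz, List.foldl_cons]
  by_cases hB : c = 'B'
  · have : pvStepA (0, 0, 0, 0) (c, 0) = (0, 0, 0, 1) := by simp [pvStepA, hB]
    rw [this, pv_zip_shift r 0, pv_phaseL r 1 (by omega)]
    simp [hB]
  · have : pvStepA (0, 0, 0, 0) (c, 0) = (1, 0, 0, 0) := by simp [pvStepA, hB]
    rw [this, pv_zip_shift r 0, pv_phaseM r 1 0 (by omega)]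
    simp [hB]

-- ---- find / count cons lemmas ----

theorem pv_go_succ (a : Char) (l : List Char) : ∀ (k : Nat),
    PySem.Chars.find.go [a] l (k + 1)
      = if PySem.Chars.find.go [a] l k = -1 then -1 else PySem.Chars.find.go [a] l k + 1 := by
  induction l with
  | nil => intro k; simp [PySem.Chars.find.go]
  | cons c t ih =>
    intro k
    by_cases hp : [a].isPrefixOf (c :: t) = true
    · simp only [PySem.Chars.find.go, hp, if_true]
      have : ¬ ((k : Int) = -1) := by omega
      simp [this]
    · simp only [PySem.Chars.find.go, hp, if_false]
      exact ih (k + 1)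

theorem pv_find_cons (c a : Char) (r : List Char) :
    PySem.Chars.find (c :: r) [a]
      = if c = a then 0
        else if PySem.Chars.find r [a] = -1 then -1 else PySem.Chars.find r [a] + 1 := by
  have hpre : [a].isPrefixOf (c :: r) = (a == c) := by
    simp [List.isPrefixOf]
  by_cases h : c = a
  · simp [PySem.Chars.find, PySem.Chars.find.go, hpre, h]
  · have : (a == c) = false := by simp [Ne.symm h]
    simp only [PySem.Chars.find, PySem.Chars.find.go, hpre, this, Bool.false_eq_true, if_false, h]
    exact pv_go_succ a r 0

theorem pv_find_nil (a : Char) : PySem.Chars.find [] [a] = -1 := by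
  simp [PySem.Chars.find, PySem.Chars.find.go]

theorem pv_count_go_singleton (a : Char) : ∀ (fuel : Nat) (l : List Char) (acc : Nat),
    l.length ≤ fuel → PySem.Chars.count.go [a] fuel l acc = acc + l.count a := by
  intro fuel
  induction fuel with
  | zero => intro l acc h; cases l with
    | nil => simp [PySem.Chars.count.go]
    | cons c t => simp at h
  | succ n ih =>
    intro l acc h
    cases l with
    | nil => simp [PySem.Chars.count.go]
    | cons c t =>
      have hlt : t.length ≤ n := by simpa using Nat.le_of_succ_le_succ h
      by_cases hac : a = c
      · subst hac
        have hpre : [a].isPrefixOf (a :: t) = true := by simp [List.isPrefixOf]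
        simp only [PySem.Chars.count.go, List.length_singleton, List.drop_one, List.tail_cons,
          hpre, if_true]
        rw [ih t (acc + 1) hlt]
        simp [List.count_cons]
        omega
      · have hpre : [a].isPrefixOf (c :: t) = false := by
          simp [List.isPrefixOf]
          exact hac
        simp only [PySem.Chars.count.go, hpre, Bool.false_eq_true, if_false]
        rw [ih t acc hlt]
        simp [List.count_cons]
        intro h'
        exact hac h'.symm

theorem pv_count_singleton (l : List Char) (a : Char) :
    PySem.Chars.count l [a] = l.count a := by
  simp only [PySem.Chars.count, List.isEmpty_cons, Bool.false_eq_true, if_false]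
  simpa using pv_count_go_singleton a l.length l 0 (le_refl _)

theorem pv_find_lt_length (l : List Char) (a : Char) (h : PySem.Chars.find l [a] ≠ -1) :
    (PySem.Chars.find l [a]).toNat < l.length := by
  have h0 : 0 ≤ PySem.Chars.find l [a] := by
    have := PySem.Chars.neg_one_le_find (s := l) (sub := [a]); omega
  have hs := (PySem.Chars.find_spec (s := l) (sub := [a]) h0).1
  have hne : List.drop (PySem.Chars.find l [a]).toNat l ≠ [] := by
    intro hnil
    rw [hnil] at hs
    exact absurd (List.prefix_nil.mp hs) (by simp)
  have := List.drop_eq_nil_iff.not.mp hne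
  omega

-- pvTail as B computes it: find the first 'B', count 'A' after it
theorem pv_tail_eq (l : List Char) :
    pvTail l = if PySem.Chars.find l ['B'] = -1 then 0
      else ((List.drop ((PySem.Chars.find l ['B']).toNat + 1) l).count 'A' : Int) := by
  induction l with
  | nil => simp [pvTail, pv_find_nil]
  | cons c t ih =>
    rw [pvTail, pv_find_cons]
    by_cases hB : c = 'B'
    · simp [hB]
    · simp only [hB, if_false]
      by_cases hf : PySem.Chars.find t ['B'] = -1
      · simp [hf, ih]
      · have h0 : 0 ≤ PySem.Chars.find t ['B'] := by
          have := PySem.Chars.neg_one_le_find (s := t) (sub := ['B']); omega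
        have hne : ¬ (PySem.Chars.find t ['B'] + 1 = -1) := by omega
        have ht : (PySem.Chars.find t ['B'] + 1).toNat + 1
            = ((PySem.Chars.find t ['B']).toNat + 1) + 1 := by omega
        simp only [hf, if_false, hne, ih, ht, List.drop_succ_cons]

-- pvLead as B computes it: find the first 'A', count 'B' before it, pvTail after it
theorem pv_lead_eq (l : List Char) : ∀ (k : Int),
    pvLead l k = if PySem.Chars.find l ['A'] = -1 then 0
      else k + ((List.take (PySem.Chars.find l ['A']).toNat l).count 'B' : Int)
             + pvTail (List.drop ((PySem.Chars.find l ['A']).toNat + 1) l) := by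
  induction l with
  | nil => intro k; simp [pvLead, pv_find_nil]
  | cons c t ih =>
    intro k
    rw [pvLead, pv_find_cons]
    by_cases hA : c = 'A'
    · simp [hA]
    · simp only [hA, if_false]
      by_cases hf : PySem.Chars.find t ['A'] = -1
      · simp [hf, ih, hA]
      · have h0 : 0 ≤ PySem.Chars.find t ['A'] := by
          have := PySem.Chars.neg_one_le_find (s := t) (sub := ['A']); omega
        have hne : ¬ (PySem.Chars.find t ['A'] + 1 = -1) := by omega
        have ht1 : (PySem.Chars.find t ['A'] + 1).toNat
            = (PySem.Chars.find t ['A']).toNat + 1 := by omega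
        simp only [hf, if_false, hne, ih, ht1, List.take_succ_cons, List.drop_succ_cons,
          List.count_cons]
        by_cases hB : c = 'B' <;> simp [hB] <;> push_cast <;> ring

-- characterisation of solution_alt for a nonempty tail
theorem pv_alt_eq (A : String) (c : Char) (r : List Char) (hA : A.toList = c :: r)
    (hr : r ≠ []) :
    solution_alt A = if c = 'B' then pvLead r 1 else pvTail r := by
  have hlen2 : 2 ≤ (c :: r).length := by
    cases r with
    | nil => exact absurd rfl hr
    | cons d t => simp
  have hnl : ¬ ((c :: r).length < 2) := by omega
  simp only [solution_alt, hA, hnl, if_false]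
  have hget : PySem.List.pyGet? (c :: r) (0 : Int) = some c := by
    simp [PySem.List.pyGet?_natCast (xs := c :: r) (n := 0)]
  by_cases hB : c = 'B'
  · -- leading-B branch
    have hgetB : PySem.List.pyGet? (c :: r) (0 : Int) = some 'B' := by rw [hget, hB]
    rw [if_pos hgetB, if_pos hB]
    rw [pv_find_cons]
    have hcB : ¬ ('B' = 'A') := by decide
    rw [hB, if_neg hcB]
    by_cases hf : PySem.Chars.find r ['A'] = -1
    · rw [if_pos hf, if_pos rfl, pv_lead_eq, if_pos hf]
    · have h0 : 0 ≤ PySem.Chars.find r ['A'] := by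
        have := PySem.Chars.neg_one_le_find (s := r) (sub := ['A']); omega
      set f := PySem.Chars.find r ['A'] with hfdef
      have hne : ¬ (f + 1 = -1) := by omega
      rw [if_neg hf, if_neg hne]
      have hflt : f.toNat < r.length := pv_find_lt_length r 'A' hf
      -- lead = count of 'B' in cs[:p]
      have hslice : PySem.List.slice ('B' :: r) none (some (f + 1)) = 'B' :: List.take f.toNat r := by
        rw [PySem.List.slice_to ('B' :: r) (by omega : (0:Int) ≤ f + 1)]
        have : (f + 1).toNat = f.toNat + 1 := by omega
        rw [this, List.take_succ_cons]
      rw [hslice, pv_count_singleton]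
      -- finish
      rw [pvFinish, pv_lead_eq, if_neg hf]
      have hk : f + 1 + 1 = ((f.toNat + 2 : Nat) : Int) := by omega
      have hkle : f.toNat + 2 ≤ ('B' :: r).length := by simp; omega
      rw [hk, PySem.Chars.findFrom_natCast ('B' :: r) ['B'] (f.toNat + 2) hkle]
      have hdropcs : List.drop (f.toNat + 2) ('B' :: r) = List.drop (f.toNat + 1) r := by
        simp [List.drop_succ_cons]
      rw [hdropcs]
      set m := List.drop (f.toNat + 1) r with hmdef
      rw [pv_tail_eq m]
      by_cases hg : PySem.Chars.find m ['B'] = -1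
      · simp only [hg, if_pos rfl, ne_eq, not_true_eq_false]
        simp [List.count_cons]
        ring
      · have hg0 : 0 ≤ PySem.Chars.find m ['B'] := by
          have := PySem.Chars.neg_one_le_find (s := m) (sub := ['B']); omega
        set g := PySem.Chars.find m ['B'] with hgdef
        have hq : ¬ (((f.toNat + 2 : Nat) : Int) + g = -1) := by omega
        simp only [hg, if_false, ne_eq, hq, not_false_eq_true, if_true]
        have hsl : PySem.List.slice ('B' :: r) (some (((f.toNat + 2 : Nat) : Int) + g + 1)) none
            = List.drop (f.toNat + 1 + (g.toNat + 1)) r := by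
          rw [PySem.List.slice_from ('B' :: r) (by omega : (0:Int) ≤ ((f.toNat + 2 : Nat) : Int) + g + 1)]
          have : (((f.toNat + 2 : Nat) : Int) + g + 1).toNat = (f.toNat + 1 + (g.toNat + 1)) + 1 := by omega
          rw [this, List.drop_succ_cons]
        rw [hsl, pv_count_singleton]
        rw [← List.drop_drop, ← hmdef]
        simp [List.count_cons]
        ring
  · -- non-B first character
    have hgetB : ¬ (PySem.List.pyGet? (c :: r) (0 : Int) = some 'B') := by
      rw [hget]; simp [hB]
    rw [if_neg hgetB, if_neg hB]
    rw [pvFinish]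
    have h1le : 1 ≤ (c :: r).length := by simp
    have h01 : (0 : Int) + 1 = ((1 : Nat) : Int) := by norm_num
    rw [h01, PySem.Chars.findFrom_natCast (c :: r) ['B'] 1 h1le]
    have hdrop1 : List.drop 1 (c :: r) = r := by simp
    rw [hdrop1, pv_tail_eq r]
    by_cases hg : PySem.Chars.find r ['B'] = -1
    · simp [hg]
    · have hg0 : 0 ≤ PySem.Chars.find r ['B'] := by
        have := PySem.Chars.neg_one_le_find (s := r) (sub := ['B']); omega
      set g := PySem.Chars.find r ['B'] with hgdef
      have hq : ¬ (((1 : Nat) : Int) + g = -1) := by omega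
      simp only [hg, if_false, ne_eq, hq, not_false_eq_true, if_true]
      have hsl : PySem.List.slice (c :: r) (some (((1 : Nat) : Int) + g + 1)) none
          = List.drop (g.toNat + 1) r := by
        rw [PySem.List.slice_from (c :: r) (by omega : (0:Int) ≤ ((1 : Nat) : Int) + g + 1)]
        have : (((1 : Nat) : Int) + g + 1).toNat = (g.toNat + 1) + 1 := by omega
        rw [this, List.drop_succ_cons]
      rw [hsl, pv_count_singleton]
      simp

-- ===== VERDICT (by name: the statement is the Claim_ definition above) =====
theorem solution_spec : Claim_equal_solution := by
  intro A _
  unfold Spec_solution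
  cases hA : A.toList with
  | nil =>
    simp [solution, solution_alt, hA]
  | cons c r =>
    cases r with
    | nil => simp [solution, solution_alt, hA]
    | cons d t =>
      rw [pv_solution_eq A c (d :: t) hA (by simp), pv_alt_eq A c (d :: t) hA (by simp)]
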